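-- pv_equiv track=rewrite | github.com/aurazboev/CS550_Advanced_Operating_Systems | Project2/Validator.py | _lookup_prefix_pom
-- ===== SOURCE A (Python) =====
-- def _lookup_prefix_pom(block_hash, difficulty, hashes):
--     prefix = block_hash[:difficulty]
--     start_index = 0
--     end_index = len(hashes) - 1
--
--     while start_index <= end_index:
--         mid_index = (start_index + end_index) // 2
--         mid_value = hashes[mid_index][:difficulty]
--
--         if mid_value == prefix:
--             return mid_index
--
--         if mid_value < prefix:
--             start_index = mid_index + 1
--         else:
--             end_index = mid_index - 1
--
--     return -1
-- ===== SOURCE B (Python) =====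
-- def _lookup_prefix_pom(block_hash, difficulty, hashes):
--     # Divide-and-conquer on list SEGMENTS: recurse on sublists carrying an
--     # offset, instead of A's iterative index-pair binary search.  The probed
--     # element k = (len(seg)-1)//2 of each segment is exactly A's midpoint,
--     # so the returned index is identical even with duplicate prefixes.
--     prefix = block_hash[:difficulty]
--
--     def go(offset, seg):
--         if not seg:
--             return -1
--         k = (len(seg) - 1) // 2
--         v = seg[k][:difficulty]
--         if v == prefix:
--             return offset + k
--         if v < prefix:
--             return go(offset + k + 1, seg[k + 1:])
--         return go(offset, seg[:k])
--
--     return go(0, hashes)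
-- ===== Notes on version B (the rewrite author's own statement) =====
-- stated objective: alternative
-- what changed: A's iterative index-pair (start,end) binary search is replaced by divide-and-conquer recursion on list segments: a helper go(offset, seg) that probes element (len(seg)-1)//2 of the current sublist and recurses on seg[k+1:] or seg[:k], carrying the offset; the probed positions coincide with A's midpoints, so the returned index is identical even with duplicate prefixes.
import Mathlib
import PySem

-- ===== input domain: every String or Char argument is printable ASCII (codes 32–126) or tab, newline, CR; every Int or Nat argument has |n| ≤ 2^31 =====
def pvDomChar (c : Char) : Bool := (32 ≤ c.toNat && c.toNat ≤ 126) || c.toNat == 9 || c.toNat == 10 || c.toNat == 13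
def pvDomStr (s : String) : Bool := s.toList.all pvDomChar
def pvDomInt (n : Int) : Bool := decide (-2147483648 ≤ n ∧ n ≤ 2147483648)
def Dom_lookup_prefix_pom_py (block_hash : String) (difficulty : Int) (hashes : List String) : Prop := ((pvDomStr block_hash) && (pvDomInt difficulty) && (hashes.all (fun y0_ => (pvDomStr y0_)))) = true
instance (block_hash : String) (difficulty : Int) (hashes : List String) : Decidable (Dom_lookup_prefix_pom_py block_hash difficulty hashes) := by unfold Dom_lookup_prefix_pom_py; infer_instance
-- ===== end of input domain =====

-- B replaces A's iterative (start,end) index-pair binary search by divide-and-conquer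
-- recursion on list segments with a carried offset; same probed positions, so the same
-- index is returned (objective: alternative, not faster).

-- ===== PORT A =====
-- the while-loop of A, state (start_index, end_index); returns inside the loop on a match
def pvALoop (pfx : String) (difficulty : Int) (hashes : List String) (s e : Int) : Int :=
  if _h : s ≤ e then
    let mid := PySem.Int.floordiv (s + e) 2
    let mv := PySem.Str.slice ((PySem.List.pyGet? hashes mid).getD "") none (some difficulty)
    if mv = pfx then mid
    else if mv < pfx then pvALoop pfx difficulty hashes (mid + 1) e
    else pvALoop pfx difficulty hashes s (mid - 1)
  else -1
termination_by (e - s + 1).toNat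
decreasing_by
  · have hb := PySem.Int.floordiv_two_mid_bounds _h
    omega
  · have hb := PySem.Int.floordiv_two_mid_bounds _h
    omega

def lookup_prefix_pom_py (block_hash : String) (difficulty : Int) (hashes : List String) : Int :=
  let pfx := PySem.Str.slice block_hash none (some difficulty)
  pvALoop pfx difficulty hashes 0 ((hashes.length : Int) - 1)

-- ===== PORT B =====
-- the helper go(offset, seg) from Source B: recursion on list segments
def pvBGo (pfx : String) (difficulty : Int) (offset : Int) (seg : List String) : Int :=
  if hEmp : seg.isEmpty then -1
  else
    let k := PySem.Int.floordiv ((seg.length : Int) - 1) 2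
    let v := PySem.Str.slice ((PySem.List.pyGet? seg k).getD "") none (some difficulty)
    if v = pfx then offset + k
    else if v < pfx then
      pvBGo pfx difficulty (offset + k + 1) (PySem.List.slice seg (some (k + 1)) none)
    else
      pvBGo pfx difficulty offset (PySem.List.slice seg none (some k))
termination_by seg.length
decreasing_by
  · have hne : seg.length ≠ 0 := by
      simpa using hEmp
    have hk : PySem.Int.floordiv ((seg.length : Int) - 1) 2 = ((seg.length : Int) - 1) / 2 :=
      PySem.Int.floordiv_eq_ediv_of_pos (by omega)
    rw [PySem.List.slice_from seg (by omega)]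
    simp only [List.length_drop]
    omega
  · have hne : seg.length ≠ 0 := by
      simpa using hEmp
    have hk : PySem.Int.floordiv ((seg.length : Int) - 1) 2 = ((seg.length : Int) - 1) / 2 :=
      PySem.Int.floordiv_eq_ediv_of_pos (by omega)
    rw [PySem.List.slice_to seg (by omega)]
    simp only [List.length_take]
    omega

def lookup_prefix_pom_py_alt (block_hash : String) (difficulty : Int) (hashes : List String) : Int :=
  let pfx := PySem.Str.slice block_hash none (some difficulty)
  pvBGo pfx difficulty 0 hashes

-- ===== PRECONDITION & SPEC =====
def Spec_lookup_prefix_pom_py (block_hash : String) (difficulty : Int) (hashes : List String) (out : Int) : Prop := out = lookup_prefix_pom_py_alt block_hash difficulty hashes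
instance (block_hash : String) (difficulty : Int) (hashes : List String) (out : Int) : Decidable (Spec_lookup_prefix_pom_py block_hash difficulty hashes out) := by unfold Spec_lookup_prefix_pom_py; infer_instance

-- ===== CLAIM =====
def Claim_equal_lookup_prefix_pom_py : Prop := ∀ (block_hash : String) (difficulty : Int) (hashes : List String), Dom_lookup_prefix_pom_py block_hash difficulty hashes → Spec_lookup_prefix_pom_py block_hash difficulty hashes (lookup_prefix_pom_py block_hash difficulty hashes)

-- ===== LEMMAS AND PROOFS =====

-- A's loop on (s, e) equals B's recursion on the segment hashes[s : e+1] with offset s.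
theorem pvSeg_eq (pfx : String) (difficulty : Int) (hashes : List String) :
    ∀ (n : Nat) (s e : Int), 0 ≤ s → e < (hashes.length : Int) → (e - s + 1).toNat ≤ n →
      pvALoop pfx difficulty hashes s e =
        pvBGo pfx difficulty s ((hashes.drop s.toNat).take (e + 1 - s).toNat) := by
  intro n
  induction n with
  | zero =>
    intro s e hs he hn
    have hse : ¬ s ≤ e := by omega
    rw [pvALoop.eq_def, pvBGo.eq_def]
    have hE : (e + 1 - s).toNat = 0 := by omega
    simp [hse, hE]
  | succ n ih =>
    intro s e hs he hn
    rw [pvALoop.eq_def, pvBGo.eq_def]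
    by_cases hse : s ≤ e
    · have hlen : ((hashes.drop s.toNat).take (e + 1 - s).toNat).length = (e + 1 - s).toNat := by
        simp only [List.length_take, List.length_drop]
        omega
      have hNE : ((hashes.drop s.toNat).take (e + 1 - s).toNat).isEmpty = false := by
        simp [← List.length_eq_zero_iff, hlen]
        omega
      simp only [hse, dite_true, hNE, Bool.false_eq_true, dite_false, hlen]
      rw [show (((e + 1 - s).toNat : Int)) = e + 1 - s from by omega]
      rw [show PySem.Int.floordiv (s + e) 2 =
            s + PySem.Int.floordiv (e + 1 - s - 1) 2 from by
        rw [PySem.Int.floordiv_eq_ediv_of_pos (a := s + e) (by omega),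
            PySem.Int.floordiv_eq_ediv_of_pos (a := e + 1 - s - 1) (by omega)]
        omega]
      generalize hK : PySem.Int.floordiv (e + 1 - s - 1) 2 = k
      have hkb : 0 ≤ k ∧ k ≤ e - s := by
        rw [PySem.Int.floordiv_eq_ediv_of_pos (by omega)] at hK
        omega
      have hget : PySem.List.pyGet? ((hashes.drop s.toNat).take (e + 1 - s).toNat) k =
          PySem.List.pyGet? hashes (s + k) := by
        rw [PySem.List.pyGet?_of_nonneg _ hkb.1, PySem.List.pyGet?_of_nonneg _ (by omega),
            List.getElem?_take_of_lt (by omega), List.getElem?_drop]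
        congr 1
        omega
      rw [hget]
      set mv := PySem.Str.slice ((PySem.List.pyGet? hashes (s + k)).getD "") none (some difficulty) with hmv
      by_cases heq : mv = pfx
      · simp [heq]
      · by_cases hlt : mv < pfx
        · have hngt : ¬ pfx < mv := not_lt_of_gt hlt
          simp only [heq, hlt, if_true, if_false]
          rw [PySem.List.slice_from _ (by omega), List.drop_take, List.drop_drop]
          have hrec := ih (s + k + 1) e (by omega) he (by omega)
          rw [show ((e + 1 - s).toNat - (k + 1).toNat) = (e + 1 - (s + k + 1)).toNat from by omega,
              show (s.toNat + (k + 1).toNat) = (s + k + 1).toNat from by omega]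
          exact hrec
        · simp only [heq, hlt, if_false]
          rw [PySem.List.slice_to _ (by omega), List.take_take]
          have hrec := ih s (s + k - 1) hs (by omega) (by omega)
          rw [show (min k.toNat (e + 1 - s).toNat) = (s + k - 1 + 1 - s).toNat from by omega]
          exact hrec
    · have hE : (e + 1 - s).toNat = 0 := by omega
      simp [hse, hE]

-- ===== VERDICT =====
theorem lookup_prefix_pom_py_spec : Claim_equal_lookup_prefix_pom_py := by
  intro block_hash difficulty hashes _hdom
  unfold Spec_lookup_prefix_pom_py lookup_prefix_pom_py lookup_prefix_pom_py_alt
  have h := pvSeg_eq (PySem.Str.slice block_hash none (some difficulty)) difficulty hashes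
    hashes.length 0 ((hashes.length : Int) - 1) le_rfl (by omega) (by omega)
  simpa using h
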